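-- pv_equiv track=rewrite | github.com/ValentinoTriadi/Bondowoso---Tubes-Daspro-2023 | data.py | splitkoma
-- ===== SOURCE A (Python) =====
-- def splitkoma (line):
--     split_value = []
--     temp = ''
--     for char in line:
--         if char == ',':
--             split_value.append(temp)
--             temp = ''
--         else:
--             temp += char
--     if temp:
--         split_value.append(temp)
--     return split_value
-- ===== SOURCE B (Python) =====
-- def splitkoma(line):
--     parts = line.split(',')
--     if parts[-1] == '':
--         parts.pop()
--     return parts
-- ===== Notes on version B (the rewrite author's own statement) =====
-- stated objective: idiomatic
-- what changed: Replaces the char-by-char accumulator loop with the standard library str.split(',') followed by dropping the trailing empty field, reproducing A's drop-last-empty behaviour exactly.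
import Mathlib
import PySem

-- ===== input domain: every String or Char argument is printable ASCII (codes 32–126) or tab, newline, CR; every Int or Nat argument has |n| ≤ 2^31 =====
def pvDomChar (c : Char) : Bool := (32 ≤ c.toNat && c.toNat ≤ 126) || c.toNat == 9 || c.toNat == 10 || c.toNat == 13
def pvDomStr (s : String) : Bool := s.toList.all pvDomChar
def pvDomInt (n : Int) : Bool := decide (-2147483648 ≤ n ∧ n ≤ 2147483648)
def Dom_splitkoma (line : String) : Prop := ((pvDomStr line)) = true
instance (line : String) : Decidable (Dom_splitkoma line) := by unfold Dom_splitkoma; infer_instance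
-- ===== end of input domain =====

-- B replaces A's char-by-char accumulator with a library split followed by dropping the trailing empty field (objective: idiomatic).

-- ===== PORT A =====
-- split_value : List String, temp : List Char (a growing piece of the string); temp += char is temp ++ [c]
def splitkoma (line : String) : List String :=
  let st := line.toList.foldl
    (fun (st : List String × List Char) c =>
      if c = ',' then (st.1 ++ [String.ofList st.2], ([] : List Char))
      else (st.1, st.2 ++ [c])) ([], [])
  if st.2 ≠ [] then st.1 ++ [String.ofList st.2] else st.1

-- ===== PORT B =====
-- parts = line.split(','); if parts[-1] == '': parts.pop(); return parts
def splitkoma_alt (line : String) : List String :=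
  match PySem.Str.split? line "," with
  | some parts => if PySem.List.pyGet? parts (-1) = some "" then parts.dropLast else parts
  | none => []   -- unreachable: the separator "," is nonempty

-- ===== PRECONDITION & SPEC =====
def Spec_splitkoma (line : String) (out : List String) : Prop := out = splitkoma_alt line
instance (line : String) (out : List String) : Decidable (Spec_splitkoma line out) := by unfold Spec_splitkoma; infer_instance

-- ===== CLAIM (what is proved, stated in full; the proofs are below) =====
def Claim_equal_splitkoma : Prop := ∀ (line : String), Dom_splitkoma line → Spec_splitkoma line (splitkoma line)

-- ===== LEMMAS AND PROOFS =====

-- Reference comma split at the char level (cur holds the current piece reversed).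
def splitAux : List Char → List Char → List (List Char)
  | [], cur => [cur.reverse]
  | c :: rest, cur => if c = ',' then cur.reverse :: splitAux rest [] else splitAux rest (c :: cur)

-- drop the last piece iff it is empty
def finishPieces : List (List Char) → List (List Char)
  | [] => []
  | [x] => if x = [] then [] else [x]
  | x :: y :: t => x :: finishPieces (y :: t)

theorem splitAux_ne_nil (l cur : List Char) : splitAux l cur ≠ [] := by
  induction l generalizing cur with
  | nil => simp [splitAux]
  | cons c rest ih => by_cases h : c = ',' <;> simp [splitAux, h, ih]

theorem go_eq_splitAux (l : List Char) (fuel : Nat) (cur : List Char)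
    (acc : List (List Char)) (h : l.length < fuel) :
    PySem.Chars.splitOn.go [','] fuel l cur acc = acc.reverse ++ splitAux l cur := by
  induction l generalizing fuel cur acc with
  | nil =>
      cases fuel with
      | zero => omega
      | succ f => simp [PySem.Chars.splitOn.go, splitAux]
  | cons c rest ih =>
      cases fuel with
      | zero => omega
      | succ f =>
        by_cases hc : c = ','
        · subst hc
          rw [show PySem.Chars.splitOn.go [','] (f+1) (',' :: rest) cur acc
              = PySem.Chars.splitOn.go [','] f rest [] (cur.reverse :: acc) by
            simp [PySem.Chars.splitOn.go, List.isPrefixOf]]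
          rw [ih f [] (cur.reverse :: acc) (by simpa using Nat.lt_of_succ_lt_succ h)]
          simp [splitAux]
        · rw [show PySem.Chars.splitOn.go [','] (f+1) (c :: rest) cur acc
              = PySem.Chars.splitOn.go [','] f rest (c :: cur) acc by
            simp [PySem.Chars.splitOn.go, List.isPrefixOf]
            intro heq; exact absurd heq.symm hc]
          rw [ih f (c :: cur) acc (by simpa using Nat.lt_of_succ_lt_succ h)]
          simp [splitAux, hc]

theorem splitOn_eq_splitAux (l : List Char) :
    PySem.Chars.splitOn l [','] = splitAux l [] := by
  have := go_eq_splitAux l (l.length + 1) [] [] (by omega)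
  simpa [PySem.Chars.splitOn] using this

-- A's loop body and final step, named for the proofs (definitionally A's inline code).
def stepA (st : List String × List Char) (c : Char) : List String × List Char :=
  if c = ',' then (st.1 ++ [String.ofList st.2], ([] : List Char)) else (st.1, st.2 ++ [c])

def finA (st : List String × List Char) : List String :=
  if st.2 ≠ [] then st.1 ++ [String.ofList st.2] else st.1

-- A's loop + final append equals finishPieces of the reference split (mapped to String).
theorem loopA_eq (l : List Char) (sv : List String) (temp : List Char) :
    finA (l.foldl stepA (sv, temp))
    = sv ++ (finishPieces (splitAux l temp.reverse)).map String.ofList := by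
  induction l generalizing sv temp with
  | nil =>
      by_cases h : temp = []
      · subst h; simp [finA, splitAux, finishPieces]
      · simp [finA, splitAux, finishPieces, h]
  | cons c rest ih =>
      by_cases hc : c = ','
      · subst hc
        rw [List.foldl_cons,
            show stepA (sv, temp) ',' = (sv ++ [String.ofList temp], ([] : List Char)) from
              if_pos rfl,
            ih]
        have hne := splitAux_ne_nil rest ([] : List Char)
        have hfin : finishPieces (temp :: splitAux rest []) =
            temp :: finishPieces (splitAux rest []) := by
          cases hsp : splitAux rest [] with
          | nil => exact absurd hsp hne
          | cons a t => simp [finishPieces]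
        simp [splitAux, hfin]
      · rw [List.foldl_cons,
            show stepA (sv, temp) c = (sv, temp ++ [c]) from if_neg hc,
            ih]
        simp [splitAux, hc]

theorem finishPieces_eq (ps : List (List Char)) (h : ps ≠ []) :
    finishPieces ps = if ps.getLast h = [] then ps.dropLast else ps := by
  induction ps with
  | nil => exact absurd rfl h
  | cons x t ih =>
      cases t with
      | nil => by_cases hx : x = [] <;> simp [finishPieces, hx]
      | cons y u =>
          rw [show finishPieces (x :: y :: u) = x :: finishPieces (y :: u) from rfl,
              ih (by simp)]
          by_cases hl : (y :: u).getLast (by simp) = [] <;>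
            simp [List.getLast_cons, hl, List.dropLast]

theorem ofList_eq_empty_iff (cs : List Char) : String.ofList cs = "" ↔ cs = [] := by
  constructor
  · intro h; have := congrArg String.toList h; simpa using this
  · intro h; subst h; rfl

-- ===== VERDICT (by name: the statement is the Claim_ definition above) =====
theorem splitkoma_spec : Claim_equal_splitkoma := by
  intro line _
  show splitkoma line = splitkoma_alt line
  have hA : splitkoma line = finA (line.toList.foldl stepA ([], [])) := rfl
  rw [hA, loopA_eq line.toList [] []]
  have hsep : (",":String).toList = [','] := by decide
  have hsplit : PySem.Str.split? line ","
      = some ((splitAux line.toList []).map String.ofList) := by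
    simp [PySem.Str.split?, PySem.Chars.split?, hsep, splitOn_eq_splitAux]
  have hB : splitkoma_alt line =
      (if PySem.List.pyGet? ((splitAux line.toList []).map String.ofList) (-1) = some ""
       then ((splitAux line.toList []).map String.ofList).dropLast
       else (splitAux line.toList []).map String.ofList) := by
    unfold splitkoma_alt; rw [hsplit]
  rw [hB]
  simp only [List.reverse_nil]
  set ps := splitAux line.toList [] with hps
  have hne : ps ≠ [] := splitAux_ne_nil _ _
  have hmne : ps.map String.ofList ≠ [] := by simpa using hne
  rw [PySem.List.pyGet?_neg_one, List.getLast?_eq_some_getLast hmne,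
      finishPieces_eq ps hne]
  simp only [List.getLast_map, Option.some.injEq, ofList_eq_empty_iff, List.nil_append]
  split_ifs with h1
  · simp [List.map_dropLast]
  · rfl
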